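-- pv_equiv track=rewrite | github.com/k-harada/AtCoder | ABC/ABC190/D.py | solve
-- ===== SOURCE A (Python) =====
-- def solve(n):
--     res = 0
--     for i in range(1, 2 * n + 1):
--         if i * i > 2 * n:
--             break
--         if (2 * n) % i == 0:
--             p = i
--             q = (2 * n) // i
--             if (q - p + 1) % 2 == 0:
--                 if p == q:
--                     res += 1
--                 else:
--                     res += 2
--     return res
-- ===== SOURCE B (Python) =====
-- def solve(n):
--     # counts 2 * (number of odd divisors of n) via a sqrt(n) divisor-pair scan
--     res = 0
--     i = 1
--     while i * i <= n:
--         if n % i == 0: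
--             if i % 2 == 1:
--                 res += 2
--             j = n // i
--             if j != i and j % 2 == 1:
--                 res += 2
--         i += 1
--     return res
-- ===== Notes on version B (the rewrite author's own statement) =====
-- stated objective: alternative
-- what changed: Instead of scanning divisors i of 2n up to sqrt(2n) and testing the parity condition (q-p+1)%2==0, B counts 2 * (number of odd divisors of n) directly by a sqrt(n) divisor-pair scan over n itself (each small divisor i and its cofactor n//i contribute 2 when odd).
import Mathlib
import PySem

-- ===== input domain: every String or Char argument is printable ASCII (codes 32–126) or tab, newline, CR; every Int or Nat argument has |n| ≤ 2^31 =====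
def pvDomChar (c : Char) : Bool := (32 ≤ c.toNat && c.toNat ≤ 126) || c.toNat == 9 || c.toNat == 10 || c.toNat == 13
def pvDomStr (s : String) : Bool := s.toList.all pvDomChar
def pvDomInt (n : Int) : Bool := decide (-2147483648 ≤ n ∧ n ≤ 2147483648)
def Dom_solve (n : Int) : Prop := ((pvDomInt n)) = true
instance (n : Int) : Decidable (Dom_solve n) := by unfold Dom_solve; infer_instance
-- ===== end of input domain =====

-- B re-implements A as 2 * (number of odd divisors of n) via a sqrt(n) divisor-pair scan of n
-- instead of A's sqrt(2n) scan of 2n with the parity test (q-p+1)%2==0; return values are proved equal.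

-- ===== PORT A =====
def solveLoopA (n i res : Int) : Int :=
  if _h : i < 2 * n + 1 then
    if i * i > 2 * n then res
    else
      solveLoopA n (i + 1)
        (if PySem.Int.mod (2 * n) i = 0 then
          let p := i
          let q := PySem.Int.floordiv (2 * n) i
          if PySem.Int.mod (q - p + 1) 2 = 0 then
            (if p = q then res + 1 else res + 2)
          else res
        else res)
  else res
termination_by (2 * n + 1 - i).toNat
decreasing_by omega

def solve (n : Int) : Int := solveLoopA n 1 0

-- ===== PORT B =====
def solveLoopB (n i res : Int) : Int :=
  if _h : i * i ≤ n then
    solveLoopB n (i + 1)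
      (if PySem.Int.mod n i = 0 then
        let res1 := if PySem.Int.mod i 2 = 1 then res + 2 else res
        let j := PySem.Int.floordiv n i
        if j ≠ i ∧ PySem.Int.mod j 2 = 1 then res1 + 2 else res1
      else res)
  else res
termination_by (n + 1 - i).toNat
decreasing_by
  have hin : i ≤ n := by nlinarith [sq_nonneg (i - 1)]
  omega

def solve_alt (n : Int) : Int := solveLoopB n 1 0

-- ===== PRECONDITION & SPEC =====
def Spec_solve (n : Int) (out : Int) : Prop := out = solve_alt n
instance (n : Int) (out : Int) : Decidable (Spec_solve n out) := by unfold Spec_solve; infer_instance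

-- ===== CLAIM (what is proved, stated in full; the proofs are below) =====
def Claim_equal_solve : Prop := ∀ (n : Int), Dom_solve n → Spec_solve n (solve n)

-- ===== LEMMAS AND PROOFS =====

-- A's loop counts k ≤ sqrt(2N) dividing 2N with k + 2N/k odd
abbrev PAP (N k : Nat) : Prop := k * k ≤ 2 * N ∧ 2 * N % k = 0 ∧ (2 * N / k + k) % 2 = 1

-- B's loop counts, for k ≤ sqrt N dividing N: k itself when odd (PS) and the cofactor N/k when odd and distinct (PL)
abbrev PSP (N k : Nat) : Prop := k * k ≤ N ∧ N % k = 0 ∧ k % 2 = 1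

abbrev PLP (N k : Nat) : Prop := k * k ≤ N ∧ N % k = 0 ∧ N / k ≠ k ∧ (N / k) % 2 = 1

def OddDiv (N : Nat) : Finset Nat := N.divisors.filter (fun d => d % 2 = 1)

-- head split of a filtered-Ico card
lemma card_filter_Ico_head (P : Nat → Prop) [DecidablePred P] (a b : Nat) (h : a < b) :
    ((Finset.Ico a b).filter P).card
      = (if P a then 1 else 0) + ((Finset.Ico (a + 1) b).filter P).card := by
  have hins : Finset.Ico a b = insert a (Finset.Ico (a + 1) b) := by
    ext x; simp only [Finset.mem_Ico, Finset.mem_insert]; omega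
  rw [hins, Finset.filter_insert]
  split_ifs with hp
  · rw [Finset.card_insert_of_notMem (by simp)]
    omega
  · omega

-- A-loop characterization
lemma loopA_eq (n : Int) (hn : 1 ≤ n) (fuel : Nat) :
    ∀ i res : Int, 1 ≤ i → (2 * n + 1 - i).toNat = fuel →
      solveLoopA n i res
        = res + 2 * (((Finset.Ico i.toNat (2 * n.toNat + 1)).filter (PAP n.toNat)).card : Int) := by
  induction fuel with
  | zero =>
    intro i res hi hf
    rw [solveLoopA, dif_neg (by omega)]
    rw [Finset.Ico_eq_empty (by omega)]
    simp
  | succ f ih =>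
    intro i res hi hf
    have hilt : i < 2 * n + 1 := by omega
    rw [solveLoopA, dif_pos hilt]
    have hii : ((i.toNat : ℤ)) = i := Int.toNat_of_nonneg (by omega)
    have hnn : ((n.toNat : ℤ)) = n := Int.toNat_of_nonneg (by omega)
    by_cases hbr : i * i > 2 * n
    · rw [if_pos hbr]
      have hempty : (Finset.Ico i.toNat (2 * n.toNat + 1)).filter (PAP n.toNat) = ∅ := by
        rw [Finset.filter_eq_empty_iff]
        intro k hk
        rw [Finset.mem_Ico] at hk
        intro hP
        have hgt : 2 * n.toNat < i.toNat * i.toNat := by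
          have : (2 * (n.toNat : ℤ)) < (i.toNat : ℤ) * (i.toNat : ℤ) := by
            rw [hii, hnn]; exact hbr
          exact_mod_cast this
        have hkk := Nat.mul_le_mul hk.1 hk.1
        have := hP.1
        omega
      rw [hempty]
      simp
    · rw [if_neg hbr]
      have hK1 : (i + 1).toNat = i.toNat + 1 := by omega
      rw [ih (i + 1) _ (by omega) (by omega), hK1,
        card_filter_Ico_head (PAP n.toNat) i.toNat (2 * n.toNat + 1) (by omega)]
      have hmodA : PySem.Int.mod (2 * n) i = ((2 * n.toNat % i.toNat : ℕ) : ℤ) := by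
        rw [← hii, ← hnn]; exact_mod_cast PySem.Int.mod_natCast (2 * n.toNat) i.toNat
      have hdivA : PySem.Int.floordiv (2 * n) i = ((2 * n.toNat / i.toNat : ℕ) : ℤ) := by
        rw [← hii, ← hnn]; exact_mod_cast PySem.Int.floordiv_natCast (2 * n.toNat) i.toNat
      have hmod2 : ∀ a : ℤ, PySem.Int.mod a 2 = a % 2 := fun a =>
        PySem.Int.mod_eq_emod_of_pos (by norm_num)
      have hsq : i.toNat * i.toNat ≤ 2 * n.toNat := by
        have : (i.toNat : ℤ) * (i.toNat : ℤ) ≤ 2 * (n.toNat : ℤ) := by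
          rw [hii, hnn]; omega
        exact_mod_cast this
      simp only [hmodA, hdivA, hmod2]
      unfold PAP
      set K := i.toNat with hKdef
      set Q := 2 * n.toNat / K with hQdef
      set R := 2 * n.toNat % K with hRdef
      split_ifs with h1 h2 h3 h4 h4 h4 <;> push_cast <;> omega

-- B-loop characterization
lemma loopB_eq (n : Int) (hn : 1 ≤ n) (fuel : Nat) :
    ∀ i res : Int, 1 ≤ i → (n + 1 - i).toNat = fuel →
      solveLoopB n i res
        = res + 2 * (((Finset.Ico i.toNat (n.toNat + 1)).filter (PSP n.toNat)).card : Int)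
              + 2 * (((Finset.Ico i.toNat (n.toNat + 1)).filter (PLP n.toNat)).card : Int) := by
  induction fuel with
  | zero =>
    intro i res hi hf
    have hni : n + 1 ≤ i := by omega
    have hgt : ¬ i * i ≤ n := by nlinarith [sq_nonneg (i - 1)]
    rw [solveLoopB, dif_neg hgt]
    rw [Finset.Ico_eq_empty (by omega)]
    simp
  | succ f ih =>
    intro i res hi hf
    have hii : ((i.toNat : ℤ)) = i := Int.toNat_of_nonneg (by omega)
    have hnn : ((n.toNat : ℤ)) = n := Int.toNat_of_nonneg (by omega)
    by_cases hg : i * i ≤ n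
    · rw [solveLoopB, dif_pos hg]
      have hile : i ≤ n := by nlinarith
      have hK1 : (i + 1).toNat = i.toNat + 1 := by omega
      rw [ih (i + 1) _ (by omega) (by omega), hK1,
        card_filter_Ico_head (PSP n.toNat) i.toNat (n.toNat + 1) (by omega),
        card_filter_Ico_head (PLP n.toNat) i.toNat (n.toNat + 1) (by omega)]
      have hmodB : PySem.Int.mod n i = ((n.toNat % i.toNat : ℕ) : ℤ) := by
        rw [← hii, ← hnn]; exact_mod_cast PySem.Int.mod_natCast n.toNat i.toNat
      have hdivB : PySem.Int.floordiv n i = ((n.toNat / i.toNat : ℕ) : ℤ) := by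
        rw [← hii, ← hnn]; exact_mod_cast PySem.Int.floordiv_natCast n.toNat i.toNat
      have hmod2 : ∀ a : ℤ, PySem.Int.mod a 2 = a % 2 := fun a =>
        PySem.Int.mod_eq_emod_of_pos (by norm_num)
      have hsq : i.toNat * i.toNat ≤ n.toNat := by
        have : (i.toNat : ℤ) * (i.toNat : ℤ) ≤ (n.toNat : ℤ) := by
          rw [hii, hnn]; omega
        exact_mod_cast this
      simp only [hmodB, hdivB, hmod2]
      unfold PSP PLP
      set K := i.toNat with hKdef
      set Q := n.toNat / K with hQdef
      set R := n.toNat % K with hRdef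
      split_ifs <;> push_cast <;> omega
    · rw [solveLoopB, dif_neg hg]
      have hgtN : n.toNat < i.toNat * i.toNat := by
        have : (n.toNat : ℤ) < (i.toNat : ℤ) * (i.toNat : ℤ) := by
          rw [hii, hnn]; omega
        exact_mod_cast this
      have he1 : (Finset.Ico i.toNat (n.toNat + 1)).filter (PSP n.toNat) = ∅ := by
        rw [Finset.filter_eq_empty_iff]
        intro k hk
        rw [Finset.mem_Ico] at hk
        intro hP
        have hkk := Nat.mul_le_mul hk.1 hk.1
        have := hP.1
        omega
      have he2 : (Finset.Ico i.toNat (n.toNat + 1)).filter (PLP n.toNat) = ∅ := by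
        rw [Finset.filter_eq_empty_iff]
        intro k hk
        rw [Finset.mem_Ico] at hk
        intro hP
        have hkk := Nat.mul_le_mul hk.1 hk.1
        have := hP.1
        omega
      rw [he1, he2]
      simp

-- the small-divisor side of B is the odd divisors d with d*d ≤ N
lemma cardS_eq (N : Nat) (hN : 1 ≤ N) :
    ((Finset.Ico 1 (N + 1)).filter (PSP N)).card
      = (OddDiv N |>.filter (fun d => d * d ≤ N)).card := by
  congr 1
  ext d
  simp only [Finset.mem_filter, Finset.mem_Ico, OddDiv, Nat.mem_divisors]
  unfold PSP
  constructor
  · rintro ⟨⟨h1, h2⟩, hdd, hmod, hodd⟩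
    exact ⟨⟨⟨Nat.dvd_of_mod_eq_zero hmod, by omega⟩, hodd⟩, hdd⟩
  · rintro ⟨⟨⟨hdvd, hN0⟩, hodd⟩, hdd⟩
    have hd0 : 0 < d := Nat.pos_of_dvd_of_pos hdvd (by omega)
    have hdN : d ≤ N := Nat.le_of_dvd (by omega) hdvd
    exact ⟨⟨hd0, by omega⟩, hdd, Nat.eq_zero_of_dvd_of_lt hdvd |> fun _ => Nat.mod_eq_zero_of_dvd hdvd, hodd⟩

-- the cofactor side of B is the odd divisors d with d*d > N, via k ↦ N/k
lemma cardL_eq (N : Nat) (hN : 1 ≤ N) :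
    ((Finset.Ico 1 (N + 1)).filter (PLP N)).card
      = (OddDiv N |>.filter (fun d => ¬ d * d ≤ N)).card := by
  refine Finset.card_bij' (fun k _ => N / k) (fun d _ => N / d) ?hi ?hj ?left ?right
  case hi =>
    intro k hk
    simp only [Finset.mem_filter, Finset.mem_Ico] at hk
    obtain ⟨⟨hk1, hk2⟩, hkk, hmod, hne, hodd⟩ := hk
    have hdvd : k ∣ N := Nat.dvd_of_mod_eq_zero hmod
    have hkd : k * (N / k) = N := Nat.mul_div_cancel' hdvd
    have hlt : k < N / k := by
      rcases Nat.lt_or_ge k (N / k) with h | h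
      · exact h
      · exfalso; exact hne (by nlinarith)
    simp only [Finset.mem_filter, OddDiv, Nat.mem_divisors]
    refine ⟨⟨⟨Nat.div_dvd_of_dvd hdvd, by omega⟩, hodd⟩, by nlinarith⟩
  case hj =>
    intro d hd
    simp only [Finset.mem_filter, OddDiv, Nat.mem_divisors] at hd
    obtain ⟨⟨⟨hdvd, hN0⟩, hodd⟩, hbig⟩ := hd
    have hd0 : 0 < d := Nat.pos_of_dvd_of_pos hdvd (by omega)
    have hkd : d * (N / d) = N := Nat.mul_div_cancel' hdvd
    have hk0 : 0 < N / d := Nat.div_pos (Nat.le_of_dvd (by omega) hdvd) hd0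
    have hlt : N / d < d := by nlinarith
    have hkdvd : N / d ∣ N := Nat.div_dvd_of_dvd hdvd
    simp only [Finset.mem_filter, Finset.mem_Ico]
    refine ⟨⟨hk0, by have := Nat.le_of_dvd (by omega) hkdvd; omega⟩, by nlinarith,
      Nat.mod_eq_zero_of_dvd hkdvd, ?_, ?_⟩
    · rw [Nat.div_div_self hdvd hN0]; omega
    · rw [Nat.div_div_self hdvd hN0]; exact hodd
  case left =>
    intro k hk
    simp only [Finset.mem_filter, Finset.mem_Ico] at hk
    exact Nat.div_div_self (Nat.dvd_of_mod_eq_zero hk.2.2.1) (by omega)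
  case right =>
    intro d hd
    simp only [Finset.mem_filter, OddDiv, Nat.mem_divisors] at hd
    exact Nat.div_div_self hd.1.1.1 hd.1.1.2

-- an odd divisor of 2N divides N
lemma odd_dvd_half {k N : Nat} (ho : k % 2 = 1) (hd : k ∣ 2 * N) : k ∣ N :=
  (Nat.Coprime.dvd_of_dvd_mul_left
    (Nat.coprime_two_right.mpr (Nat.odd_iff.mpr ho)) hd)

-- A's counted set is in bijection with the odd divisors of N
lemma cardA_eq (N : Nat) (hN : 1 ≤ N) :
    ((Finset.Ico 1 (2 * N + 1)).filter (PAP N)).card = (OddDiv N).card := by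
  refine Finset.card_bij' (fun k _ => if k % 2 = 1 then k else 2 * N / k)
    (fun d _ => if d * d ≤ 2 * N then d else 2 * N / d) ?hi ?hj ?left ?right
  case hi =>
    intro k hk
    simp only [Finset.mem_filter, Finset.mem_Ico] at hk
    obtain ⟨⟨hk1, hk2⟩, hkk, hmod, hpar⟩ := hk
    have hdvd : k ∣ 2 * N := Nat.dvd_of_mod_eq_zero hmod
    have hkd : k * (2 * N / k) = 2 * N := Nat.mul_div_cancel' hdvd
    simp only [Finset.mem_filter, OddDiv, Nat.mem_divisors]
    split_ifs with ho
    · exact ⟨⟨odd_dvd_half ho hdvd, by omega⟩, ho⟩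
    · have hcodd : (2 * N / k) % 2 = 1 := by omega
      exact ⟨⟨odd_dvd_half hcodd (Nat.div_dvd_of_dvd hdvd), by omega⟩, hcodd⟩
  case hj =>
    intro d hd
    simp only [Finset.mem_filter, OddDiv, Nat.mem_divisors] at hd
    obtain ⟨⟨hdvd, hN0⟩, hodd⟩ := hd
    have hd0 : 0 < d := Nat.pos_of_dvd_of_pos hdvd (by omega)
    have hdvd2 : d ∣ 2 * N := hdvd.mul_left 2
    have hkd : d * (2 * N / d) = 2 * N := Nat.mul_div_cancel' hdvd2
    have hcof : 2 * N / d = 2 * (N / d) := Nat.mul_div_assoc 2 hdvd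
    have hcd : d * (N / d) = N := Nat.mul_div_cancel' hdvd
    simp only [Finset.mem_filter, Finset.mem_Ico]
    split_ifs with hsm
    · refine ⟨⟨by omega, by have := Nat.le_of_dvd (by omega) hdvd; omega⟩, hsm,
        Nat.mod_eq_zero_of_dvd hdvd2, ?_⟩
      rw [hcof]; omega
    · have hk0 : 0 < 2 * N / d := Nat.div_pos (Nat.le_of_dvd (by omega) hdvd2) hd0
      have hlt : 2 * N / d < d := by nlinarith [Nat.lt_of_not_le hsm]
      refine ⟨⟨hk0, by have := Nat.div_le_self (2 * N) d; omega⟩, by nlinarith, Nat.mod_eq_zero_of_dvd (Nat.div_dvd_of_dvd hdvd2), ?_⟩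
      rw [Nat.div_div_self hdvd2 (by omega), hcof]
      omega
  case left =>
    intro k hk
    simp only [Finset.mem_filter, Finset.mem_Ico] at hk
    obtain ⟨⟨hk1, hk2⟩, hkk, hmod, hpar⟩ := hk
    have hdvd : k ∣ 2 * N := Nat.dvd_of_mod_eq_zero hmod
    have hkd : k * (2 * N / k) = 2 * N := Nat.mul_div_cancel' hdvd
    dsimp only
    by_cases ho : k % 2 = 1
    · rw [if_pos ho, if_pos hkk]
    · rw [if_neg ho]
      have hko : (2 * N / k) % 2 = 1 := by omega
      have hne : k ≠ 2 * N / k := by omega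
      have hle : k ≤ 2 * N / k := by nlinarith
      have hlt : k < 2 * N / k := lt_of_le_of_ne hle hne
      have hgt : ¬ (2 * N / k) * (2 * N / k) ≤ 2 * N := by nlinarith
      rw [if_neg hgt]
      exact Nat.div_div_self hdvd (by omega)
  case right =>
    intro d hd
    simp only [Finset.mem_filter, OddDiv, Nat.mem_divisors] at hd
    obtain ⟨⟨hdvd, hN0⟩, hodd⟩ := hd
    have hd0 : 0 < d := Nat.pos_of_dvd_of_pos hdvd (by omega)
    have hdvd2 : d ∣ 2 * N := hdvd.mul_left 2
    have hkd : d * (2 * N / d) = 2 * N := Nat.mul_div_cancel' hdvd2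
    have hcof : 2 * N / d = 2 * (N / d) := Nat.mul_div_assoc 2 hdvd
    dsimp only
    by_cases hsm : d * d ≤ 2 * N
    · rw [if_pos hsm, if_pos hodd]
    · rw [if_neg hsm]
      have hev : (2 * N / d) % 2 = 0 := by rw [hcof]; omega
      rw [if_neg (by omega : ¬ (2 * N / d) % 2 = 1)]
      exact Nat.div_div_self hdvd2 (by omega)

theorem solve_eq_alt (n : Int) : solve n = solve_alt n := by
  by_cases hn : 1 ≤ n
  · have hN1 : 1 ≤ n.toNat := by omega
    unfold solve solve_alt
    rw [loopA_eq n hn ((2 * n + 1 - 1).toNat) 1 0 (by norm_num) rfl,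
      loopB_eq n hn ((n + 1 - 1).toNat) 1 0 (by norm_num) rfl]
    simp only [Int.toNat_one]
    rw [cardA_eq n.toNat hN1, cardS_eq n.toNat hN1, cardL_eq n.toNat hN1]
    have hsplit := Finset.card_filter_add_card_filter_not
      (s := OddDiv n.toNat) (p := fun d => d * d ≤ n.toNat)
    omega
  · unfold solve solve_alt
    rw [solveLoopA, dif_neg (by omega), solveLoopB, dif_neg (by rw [one_mul]; omega)]

-- ===== VERDICT (by name: the statement is the Claim_ definition above) =====
theorem solve_spec : Claim_equal_solve := by
  intro n _
  unfold Spec_solve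
  exact solve_eq_alt n
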